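-- pv_equiv track=rewrite | github.com/Indyshark85/Portfolio | Python/C200-Assignments-cdinman-main/Assignment3/a3.py | go_fund_me
-- ===== SOURCE A (Python) =====
-- def go_fund_me(amt,donations):
--     total= 0
--     rem=donations.copy()
--     for x in donations:
--         total+=x
--         rem.remove(x)
--         if total>=amt:
--             break
--         rem.append(x)
--
--     if total>=amt:
--         return(amt,rem,total-amt)
--     else:
--         return(amt,[],-(amt-total))
-- ===== SOURCE B (Python) =====
-- def go_fund_me(amt, donations):
--     total = 0
--     for k, x in enumerate(donations):
--         total += x
--         if total >= amt:
--             return (amt, donations[k+1:] + donations[:k], total - amt)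
--     return (amt, [], total - amt)
-- ===== Notes on version B (the rewrite author's own statement) =====
-- stated objective: simpler
-- what changed: Replaces the mutated rem list (copy, then remove/append on every iteration) by a single running-sum pass that finds the break index k and builds the result with two slices donations[k+1:]+donations[:k]; no list mutation at all.
import Mathlib
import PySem

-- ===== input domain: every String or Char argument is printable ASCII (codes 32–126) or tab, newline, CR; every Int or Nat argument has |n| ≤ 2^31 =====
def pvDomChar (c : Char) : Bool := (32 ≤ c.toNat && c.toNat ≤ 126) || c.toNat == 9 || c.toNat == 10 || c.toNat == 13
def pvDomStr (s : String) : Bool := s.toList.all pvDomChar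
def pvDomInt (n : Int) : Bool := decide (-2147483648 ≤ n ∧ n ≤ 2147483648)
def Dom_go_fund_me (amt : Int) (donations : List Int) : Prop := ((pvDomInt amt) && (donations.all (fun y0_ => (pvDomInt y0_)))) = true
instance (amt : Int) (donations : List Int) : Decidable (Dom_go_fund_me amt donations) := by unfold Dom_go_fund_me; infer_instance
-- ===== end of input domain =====

-- B replaces A's copy/remove/append list mutation by a single running-sum pass
-- returning slices donations[k+1:]+donations[:k]; objective: simpler (no mutation).


-- ===== PORT A =====
-- A's for-loop with break, carrying (total, rem); rem.remove(x) via PySem.List.remove?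
-- (x is always the head of rem, so remove? never returns none; getD rem is unreachable).
def goA_loop (amt : Int) (xs : List Int) (total : Int) (rem : List Int) : Int × List Int :=
  match xs with
  | [] => (total, rem)
  | x :: rest =>
    let total := total + x
    let rem := (PySem.List.remove? rem x).getD rem
    if total ≥ amt then (total, rem)
    else goA_loop amt rest total (rem ++ [x])

def go_fund_me (amt : Int) (donations : List Int) : Int × List Int × Int :=
  let p := goA_loop amt donations 0 donations
  if p.1 ≥ amt then (amt, p.2, p.1 - amt) else (amt, [], -(amt - p.1))

-- ===== PORT B =====
-- B's enumerate loop: running sum, index k; slices via drop/take (k ≥ 0, exact).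
def goB_loop (amt : Int) (donations : List Int) (k : Nat) (total : Int) (xs : List Int) : Int × List Int × Int :=
  match xs with
  | [] => (amt, [], total - amt)
  | x :: rest =>
    let total := total + x
    if total ≥ amt then (amt, donations.drop (k+1) ++ donations.take k, total - amt)
    else goB_loop amt donations (k+1) total rest

def go_fund_me_alt (amt : Int) (donations : List Int) : Int × List Int × Int :=
  goB_loop amt donations 0 0 donations

-- ===== PRECONDITION & SPEC =====
def Spec_go_fund_me (amt : Int) (donations : List Int) (out : Int × List Int × Int) : Prop := out = go_fund_me_alt amt donations
instance (amt : Int) (donations : List Int) (out : Int × List Int × Int) : Decidable (Spec_go_fund_me amt donations out) := by unfold Spec_go_fund_me; infer_instance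

-- ===== CLAIM (what is proved, stated in full; the proofs are below) =====
def Claim_equal_go_fund_me : Prop := ∀ (amt : Int) (donations : List Int), Dom_go_fund_me amt donations → Spec_go_fund_me amt donations (go_fund_me amt donations)

-- ===== LEMMAS AND PROOFS =====

-- Loop invariant: at entry of iteration k, A's rem is xs ++ donations.take k with
-- xs = donations.drop k, and either total < amt or nothing was processed yet.
theorem go_key : ∀ (xs : List Int) (amt total : Int) (donations : List Int) (k : Nat),
    xs = donations.drop k →
    (total < amt ∨ donations.take k = []) →
    (let p := goA_loop amt xs total (xs ++ donations.take k)
     if p.1 ≥ amt then (amt, p.2, p.1 - amt) else (amt, ([] : List Int), -(amt - p.1)))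
      = goB_loop amt donations k total xs := by
  intro xs
  induction xs with
  | nil =>
    intro amt total donations k _ h
    simp only [goA_loop, goB_loop, List.nil_append]
    rcases h with h | h
    · rw [if_neg (by omega), show -(amt - total) = total - amt by omega]
    · rw [h]
      split <;> simp <;> omega
  | cons x rest ih =>
    intro amt total donations k hxs h
    have hdrop1 : rest = donations.drop (k+1) := by
      have := congrArg (List.drop 1) hxs
      simpa [List.drop_drop, Nat.add_comm] using this
    simp only [goA_loop, goB_loop, List.cons_append, PySem.List.remove?_cons_self,
      Option.getD_some]
    by_cases hge : total + x ≥ amt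
    · rw [if_pos hge, if_pos hge, if_pos hge]
      rw [hdrop1]
    · rw [if_neg hge, if_neg hge]
      have htake : donations.take (k+1) = donations.take k ++ [x] := by
        have hget : donations[k]? = some x := by
          have := congrArg List.head? hxs
          simpa [List.head?_drop] using this.symm
        simp [List.take_add_one, hget]
      have := ih amt (total + x) donations (k+1) hdrop1 (Or.inl (by omega))
      rw [← this, htake]
      simp

-- ===== VERDICT (by name: the statement is the Claim_ definition above) =====
theorem go_fund_me_spec : Claim_equal_go_fund_me := by
  intro amt donations _
  unfold Spec_go_fund_me go_fund_me go_fund_me_alt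
  have := go_key donations amt 0 donations 0 (by simp) (Or.inr (by simp))
  simpa using this
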